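-- pv_equiv track=rewrite | github.com/neilstudd/advent-of-code | 2024/day19/day19.py | count_ways_to_form_pattern
-- ===== SOURCE A (Python) =====
-- def count_ways_to_form_pattern(pattern, towels, result=None):
--     if result is None:
--         result = {}
--     if pattern in result:
--         return result[pattern]
--     if pattern == "":
--         return 1
--     count = 0
--     for towel in towels:
--         if pattern.startswith(towel):
--             count += count_ways_to_form_pattern(pattern[len(towel):], towels, result)
--     result[pattern] = count
--     return count
-- ===== SOURCE B (Python) =====
-- def count_ways_to_form_pattern(pattern, towels, result=None):
--     # Bottom-up DP over suffixes (shortest first); return value only - does not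
--     # populate the caller's cache dict as A does, but reads it the same way.
--     cache = {} if result is None else result
--     n = len(pattern)
--     dp = [cache[""] if "" in cache else 1]  # dp[0] = ways for the longest suffix done so far
--     for j in range(1, n + 1):
--         suffix = pattern[n - j:]
--         if suffix in cache:
--             ways = cache[suffix]
--         else:
--             ways = 0
--             for t in towels:
--                 if t and suffix.startswith(t):
--                     ways += dp[len(t) - 1]
--         dp = [ways] + dp
--     return dp[0]
-- ===== Notes on version B (the rewrite author's own statement) =====
-- stated objective: alternative
-- what changed: Replaced A's memoized top-down recursion (dict cache threaded through recursive calls) by an iterative bottom-up DP that builds a list of way-counts over the pattern's suffixes, shortest first, consulting the caller-supplied cache the same way.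
import Mathlib
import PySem

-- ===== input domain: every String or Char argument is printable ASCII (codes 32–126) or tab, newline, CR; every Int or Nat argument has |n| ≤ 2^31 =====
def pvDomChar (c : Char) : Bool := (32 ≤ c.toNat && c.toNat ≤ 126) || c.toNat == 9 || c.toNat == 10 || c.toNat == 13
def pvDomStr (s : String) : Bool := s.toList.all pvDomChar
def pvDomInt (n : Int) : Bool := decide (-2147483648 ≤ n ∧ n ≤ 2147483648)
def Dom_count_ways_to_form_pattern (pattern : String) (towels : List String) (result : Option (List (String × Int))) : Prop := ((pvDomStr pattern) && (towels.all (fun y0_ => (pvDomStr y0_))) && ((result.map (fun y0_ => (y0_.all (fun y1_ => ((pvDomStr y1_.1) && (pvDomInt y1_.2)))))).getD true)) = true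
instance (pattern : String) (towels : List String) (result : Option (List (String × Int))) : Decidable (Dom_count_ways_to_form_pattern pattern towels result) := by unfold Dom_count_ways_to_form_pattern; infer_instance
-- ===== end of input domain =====

-- B replaces A's memoized top-down recursion by a bottom-up DP over suffixes (objective:
-- alternative decomposition).  A also fills the caller-supplied cache dict in place; the
-- equivalence proved here is about the RETURN value only (B does not mutate the cache).

-- ===== PORT A =====
-- the incoming cache (`result` after `if result is None: result = {}`), keys as char lists
def pvCacheOf (result : Option (List (String × Int))) : PySem.Dict (List Char) Int :=
  PySem.Dict.mk ((result.getD []).map (fun q => (q.1.toList, q.2)))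

-- A's memoized recursion, dict threaded through; fuel = |pattern| + 1 is a totality guard
-- only (under Pre_ every recursive call strictly shortens the pattern, so it never runs out)
def cwGo (towels : List String) : Nat → List Char → PySem.Dict (List Char) Int →
    Int × PySem.Dict (List Char) Int
  | 0, _, d => (0, d)
  | fuel+1, p, d =>
    match PySem.Dict.get? d p with
    | some v => (v, d)                        -- if pattern in result: return result[pattern]
    | none =>
      if p = [] then (1, d)                   -- if pattern == "": return 1
      else
        let r := towels.foldl (fun (acc : Int × PySem.Dict (List Char) Int) towel =>
            if PySem.Chars.startswith p towel.toList then
              let s := cwGo towels fuel (p.drop towel.toList.length) acc.2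
              (acc.1 + s.1, s.2)
            else acc) (0, d)
        (r.1, PySem.Dict.insert r.2 p r.1)    -- result[pattern] = count; return count

def count_ways_to_form_pattern (pattern : String) (towels : List String)
    (result : Option (List (String × Int))) : Int :=
  (cwGo towels (pattern.toList.length + 1) pattern.toList (pvCacheOf result)).1

-- ===== PORT B =====
-- bottom-up DP: dp[0] = ways for the longest suffix computed so far (Source B prepends);
-- dp[len(t)-1] is always in range in Source B (1 ≤ len(t) ≤ j = len(dp)), so getD's default is never used
def count_ways_to_form_pattern_alt (pattern : String) (towels : List String)
    (result : Option (List (String × Int))) : Int :=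
  let cache := pvCacheOf result
  let p := pattern.toList
  let n := p.length
  let dp0 : List Int := [match PySem.Dict.get? cache ([] : List Char) with
                         | some v => v | none => 1]
  let dp := (PySem.List.pyRange 1 ((n : Int) + 1)).foldl (fun (dp : List Int) (j : Int) =>
      let suffix := p.drop (n - j.toNat)
      let ways : Int :=
        match PySem.Dict.get? cache suffix with
        | some v => v
        | none =>
          towels.foldl (fun acc t =>
            if t.toList ≠ [] ∧ PySem.Chars.startswith suffix t.toList then
              acc + dp.getD (t.toList.length - 1) 0
            else acc) 0
      ways :: dp) dp0
  dp.getD 0 0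

-- ===== PRECONDITION & SPEC =====
-- Pre_ excludes exactly the inputs on which A raises RecursionError: a nonempty pattern
-- together with an empty-string towel and no cache entry for the pattern itself makes A
-- recurse on the unchanged pattern forever.
def Pre_count_ways_to_form_pattern (pattern : String) (towels : List String) (result : Option (List (String × Int))) : Prop :=
  pattern = "" ∨ "" ∉ towels ∨ ∃ q ∈ result.getD [], q.1 = pattern
instance (pattern : String) (towels : List String) (result : Option (List (String × Int))) : Decidable (Pre_count_ways_to_form_pattern pattern towels result) := by unfold Pre_count_ways_to_form_pattern; infer_instance
def pvWitness_count_ways_to_form_pattern : String × List String × (Option (List (String × Int))) :=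
  ("abab", (["a", "ab", "b"], none))

def Spec_count_ways_to_form_pattern (pattern : String) (towels : List String) (result : Option (List (String × Int))) (out : Int) : Prop := out = count_ways_to_form_pattern_alt pattern towels result
instance (pattern : String) (towels : List String) (result : Option (List (String × Int))) (out : Int) : Decidable (Spec_count_ways_to_form_pattern pattern towels result out) := by unfold Spec_count_ways_to_form_pattern; infer_instance

-- ===== CLAIM (what is proved, stated in full; the proofs are below) =====
def Claim_equal_count_ways_to_form_pattern : Prop := ∀ (pattern : String) (towels : List String) (result : Option (List (String × Int))), Dom_count_ways_to_form_pattern pattern towels result → Pre_count_ways_to_form_pattern pattern towels result → Spec_count_ways_to_form_pattern pattern towels result (count_ways_to_form_pattern pattern towels result)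
-- ===== LEMMAS AND PROOFS =====

-- the pure (dict-free) value of A's recursion: the specification both ports are reduced to
def cwF (towels : List String) (cache : PySem.Dict (List Char) Int) : Nat → List Char → Int
  | 0, _ => 0
  | fuel+1, p =>
    match PySem.Dict.get? cache p with
    | some v => v
    | none =>
      if p = [] then 1
      else towels.foldl (fun acc towel =>
        if PySem.Chars.startswith p towel.toList then
          acc + cwF towels cache fuel (p.drop towel.toList.length)
        else acc) 0

-- fuel independence of cwF when no towel is empty
theorem cwF_stable (towels : List String) (cache : PySem.Dict (List Char) Int)
    (hnt : "" ∉ towels) :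
    ∀ fuel p, p.length < fuel →
      cwF towels cache fuel p = cwF towels cache (p.length + 1) p := by
  intro fuel
  induction fuel using Nat.strong_induction_on with
  | _ fuel ih =>
    match fuel with
    | 0 => intro p h; omega
    | m+1 =>
      intro p h
      simp only [cwF]
      cases hg : PySem.Dict.get? cache p with
      | some v => rfl
      | none =>
        by_cases hp : p = []
        · simp [hp]
        · simp only [hp, if_false]
          apply PySem.List.foldl_congr_mem
          intro acc t ht
          by_cases hsw : PySem.Chars.startswith p t.toList
          · simp only [hsw, if_true]
            have htne : t.toList ≠ [] := fun h0 => hnt (String.toList_eq_nil_iff.mp h0 ▸ ht)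
            have hpre : t.toList <+: p := (PySem.Chars.startswith_iff _ _).mp hsw
            have hlen : t.toList.length ≤ p.length := hpre.length_le
            have hlen1 : 1 ≤ t.toList.length := List.length_pos_of_ne_nil htne
            have hplen : 1 ≤ p.length := Nat.pos_of_ne_zero (fun h0 => hp (List.eq_nil_of_length_eq_zero h0))
            have hd : (p.drop t.toList.length).length = p.length - t.toList.length := List.length_drop ..
            rw [ih m (by omega) _ (by omega), ih p.length (by omega) _ (by omega)]
          · simp [hsw]

-- the invariant carried by A's threaded dict
def cwInv (towels : List String) (cache d : PySem.Dict (List Char) Int) : Prop :=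
  (∀ k v, PySem.Dict.get? d k = some v → v = cwF towels cache (k.length + 1) k) ∧
  (∀ k v, PySem.Dict.get? cache k = some v → PySem.Dict.get? d k = some v)

theorem cwGo_correct (towels : List String) (cache : PySem.Dict (List Char) Int)
    (hnt : "" ∉ towels) :
    ∀ fuel p d, p.length < fuel → cwInv towels cache d →
      (cwGo towels fuel p d).1 = cwF towels cache (p.length + 1) p ∧
      cwInv towels cache (cwGo towels fuel p d).2 := by
  intro fuel
  induction fuel using Nat.strong_induction_on with
  | _ fuel ih =>
    match fuel with
    | 0 => intro p d h; omega
    | m+1 =>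
      intro p d h hinv
      simp only [cwGo]
      cases hg : PySem.Dict.get? d p with
      | some v =>
        exact ⟨(hinv.1 p v hg).symm ▸ rfl, hinv⟩
      | none =>
        by_cases hp : p = []
        · subst hp
          have hc : PySem.Dict.get? cache ([] : List Char) = none := by
            cases hc : PySem.Dict.get? cache ([] : List Char) with
            | none => rfl
            | some v => exact absurd (hinv.2 _ _ hc) (by simp [hg])
          rw [if_pos rfl]
          refine ⟨?_, hinv⟩
          simp [cwF, hc]
        · simp only [if_neg hp]
          have hplen : 1 ≤ p.length := Nat.pos_of_ne_zero (fun h0 => hp (List.eq_nil_of_length_eq_zero h0))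
          have hc : PySem.Dict.get? cache p = none := by
            cases hc : PySem.Dict.get? cache p with
            | none => rfl
            | some v => exact absurd (hinv.2 _ _ hc) (by simp [hg])
          -- the fold, with the pure fold alongside
          have key : ∀ (l : List String), (∀ t, t ∈ l → t ∈ towels) → ∀ (a : Int) (d' : PySem.Dict (List Char) Int),
              cwInv towels cache d' →
              (l.foldl (fun (acc : Int × PySem.Dict (List Char) Int) towel =>
                  if PySem.Chars.startswith p towel.toList then
                    let s := cwGo towels m (p.drop towel.toList.length) acc.2
                    (acc.1 + s.1, s.2)
                  else acc) (a, d')).1 =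
                l.foldl (fun acc towel =>
                  if PySem.Chars.startswith p towel.toList then
                    acc + cwF towels cache m (p.drop towel.toList.length)
                  else acc) a ∧
              cwInv towels cache (l.foldl (fun (acc : Int × PySem.Dict (List Char) Int) towel =>
                  if PySem.Chars.startswith p towel.toList then
                    let s := cwGo towels m (p.drop towel.toList.length) acc.2
                    (acc.1 + s.1, s.2)
                  else acc) (a, d')).2 := by
            intro l
            induction l with
            | nil => intro _ a d' hi; exact ⟨rfl, hi⟩
            | cons t l ihl =>
              intro hl a d' hi
              by_cases hsw : PySem.Chars.startswith p t.toList
              · have ht : t ∈ towels := hl t (by simp)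
                have htne : t.toList ≠ [] := fun h0 => hnt (String.toList_eq_nil_iff.mp h0 ▸ ht)
                have hlen1 : 1 ≤ t.toList.length := List.length_pos_of_ne_nil htne
                have hlen : t.toList.length ≤ p.length :=
                  ((PySem.Chars.startswith_iff _ _).mp hsw).length_le
                have hd : (p.drop t.toList.length).length = p.length - t.toList.length := List.length_drop ..
                have hrec := ih m (by omega) (p.drop t.toList.length) d' (by omega) hi
                have hv : (cwGo towels m (p.drop t.toList.length) d').1 =
                    cwF towels cache m (p.drop t.toList.length) := by
                  rw [hrec.1, cwF_stable towels cache hnt m _ (by omega)]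
                simp only [List.foldl_cons, if_pos hsw]
                rw [hv]
                exact ihl (fun t' ht' => hl t' (by simp [ht'])) (a + cwF towels cache m (p.drop t.toList.length)) _ hrec.2
              · simp only [List.foldl_cons, if_neg hsw]
                exact ihl (fun t' ht' => hl t' (by simp [ht'])) a d' hi
          have hk := key towels (fun _ ht => ht) 0 d hinv
          constructor
          · show (towels.foldl _ (0, d)).1 = _
            rw [hk.1]
            conv_rhs => rw [cwF]
            simp only [hc, if_neg hp]
            apply PySem.List.foldl_congr_mem
            intro acc t ht
            by_cases hsw : PySem.Chars.startswith p t.toList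
            · simp only [hsw, if_true]
              have htne : t.toList ≠ [] := fun h0 => hnt (String.toList_eq_nil_iff.mp h0 ▸ ht)
              have hlen1 : 1 ≤ t.toList.length := List.length_pos_of_ne_nil htne
              have hlen : t.toList.length ≤ p.length :=
                ((PySem.Chars.startswith_iff _ _).mp hsw).length_le
              have hd : (p.drop t.toList.length).length = p.length - t.toList.length := List.length_drop ..
              rw [cwF_stable towels cache hnt m _ (by omega),
                  cwF_stable towels cache hnt p.length _ (by omega)]
            · simp [hsw]
          · -- invariant after the insert
            set r := towels.foldl (fun (acc : Int × PySem.Dict (List Char) Int) towel =>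
                  if PySem.Chars.startswith p towel.toList then
                    let s := cwGo towels m (p.drop towel.toList.length) acc.2
                    (acc.1 + s.1, s.2)
                  else acc) (0, d) with hr
            have hval : r.1 = cwF towels cache (p.length + 1) p := by
              rw [hk.1]
              conv_rhs => rw [cwF]
              simp only [hc, if_neg hp]
              apply PySem.List.foldl_congr_mem
              intro acc t ht
              by_cases hsw : PySem.Chars.startswith p t.toList
              · simp only [hsw, if_true]
                have htne : t.toList ≠ [] := fun h0 => hnt (String.toList_eq_nil_iff.mp h0 ▸ ht)
                have hlen1 : 1 ≤ t.toList.length := List.length_pos_of_ne_nil htne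
                have hlen : t.toList.length ≤ p.length :=
                  ((PySem.Chars.startswith_iff _ _).mp hsw).length_le
                have hd : (p.drop t.toList.length).length = p.length - t.toList.length := List.length_drop ..
                rw [cwF_stable towels cache hnt m _ (by omega),
                    cwF_stable towels cache hnt p.length _ (by omega)]
              · simp [hsw]
            constructor
            · intro k v hkv
              rw [PySem.Dict.get?_insert] at hkv
              split at hkv
              · next heq => subst heq; rw [← Option.some_inj.mp hkv, hval]
              · exact hk.2.1 k v hkv
            · intro k v hkv
              rw [PySem.Dict.get?_insert]
              split
              · next heq => subst heq; rw [hc] at hkv; exact absurd hkv (by simp)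
              · exact hk.2.2 k v hkv

-- B's loop body, abbreviated
def stepB (towels : List String) (cache : PySem.Dict (List Char) Int) (p : List Char)
    (dp : List Int) (j : Int) : List Int :=
  let suffix := p.drop (p.length - j.toNat)
  let ways : Int :=
    match PySem.Dict.get? cache suffix with
    | some v => v
    | none =>
      towels.foldl (fun acc t =>
        if t.toList ≠ [] ∧ PySem.Chars.startswith suffix t.toList then
          acc + dp.getD (t.toList.length - 1) 0
        else acc) 0
  ways :: dp

-- dp after the loop has processed j = 1 .. jhi
def dpAt (towels : List String) (cache : PySem.Dict (List Char) Int) (p : List Char)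
    (jhi : Nat) : List Int :=
  (List.range (jhi+1)).map (fun k =>
    cwF towels cache ((p.drop (p.length - jhi + k)).length + 1) (p.drop (p.length - jhi + k)))

theorem stepB_eq (towels : List String) (cache : PySem.Dict (List Char) Int)
    (hnt : "" ∉ towels) (p : List Char) (jlo : Nat) (h1 : 1 ≤ jlo) (h2 : jlo ≤ p.length) :
    stepB towels cache p (dpAt towels cache p (jlo - 1)) (jlo : Int) =
      dpAt towels cache p jlo := by
  set n := p.length with hn
  have htn : ((jlo : Int)).toNat = jlo := Int.toNat_natCast jlo
  have hsl : (p.drop (n - jlo)).length = jlo := by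
    rw [List.length_drop]; omega
  have hways : (match PySem.Dict.get? cache (p.drop (n - jlo)) with
      | some v => v
      | none =>
        towels.foldl (fun acc t =>
          if t.toList ≠ [] ∧ PySem.Chars.startswith (p.drop (n - jlo)) t.toList then
            acc + (dpAt towels cache p (jlo - 1)).getD (t.toList.length - 1) 0
          else acc) 0) =
      cwF towels cache ((p.drop (n - jlo)).length + 1) (p.drop (n - jlo)) := by
    rw [hsl]
    cases hcs : PySem.Dict.get? cache (p.drop (n - jlo)) with
    | some v => rw [cwF]; rw [hcs]
    | none =>
      have hsne : p.drop (n - jlo) ≠ [] := by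
        intro h0; rw [h0] at hsl; simp at hsl; omega
      conv_rhs => rw [cwF]
      rw [hcs]
      simp only [if_neg hsne]
      apply PySem.List.foldl_congr_mem
      intro acc t ht
      have htne : t.toList ≠ [] := fun h0 => hnt (String.toList_eq_nil_iff.mp h0 ▸ ht)
      by_cases hsw : PySem.Chars.startswith (p.drop (n - jlo)) t.toList
      · simp only [hsw, htne, ne_eq, not_false_eq_true, and_self, if_pos]
        congr 1
        have hlen1 : 1 ≤ t.toList.length := List.length_pos_of_ne_nil htne
        have hlen : t.toList.length ≤ jlo := by
          have := ((PySem.Chars.startswith_iff _ _).mp hsw).length_le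
          omega
        unfold dpAt
        rw [show (jlo - 1) + 1 = jlo by omega,
            PySem.List.getD_map_range _ _ _ _ (by omega)]
        have e1 : n - (jlo - 1) + (t.toList.length - 1) = n - jlo + t.toList.length := by omega
        rw [e1]
        have e2 : (p.drop (n - jlo)).drop t.toList.length = p.drop (n - jlo + t.toList.length) :=
          List.drop_drop
        rw [e2]
        have e3 : (p.drop (n - jlo + t.toList.length)).length = jlo - t.toList.length := by
          rw [List.length_drop]; omega
        rw [cwF_stable towels cache hnt jlo _ (by rw [e3]; omega), e3]
      · simp [hsw]
  show (match PySem.Dict.get? cache (p.drop (n - ((jlo : Int)).toNat)) with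
      | some v => v
      | none => _) :: _ = _
  rw [htn, hways, hsl]
  conv_rhs => unfold dpAt; rw [List.range_succ_eq_map, List.map_cons, List.map_map]
  congr 1
  · rw [show p.length - jlo + 0 = n - jlo by omega, hsl]
  · unfold dpAt
    rw [show (jlo - 1) + 1 = jlo by omega]
    apply List.map_congr_left
    intro k _
    simp only [Function.comp_apply, Nat.succ_eq_add_one]
    rw [show p.length - (jlo - 1) + k = p.length - jlo + (k + 1) by omega]


theorem loopB (towels : List String) (cache : PySem.Dict (List Char) Int)
    (hnt : "" ∉ towels) (p : List Char) :
    ∀ (k jlo : Nat), jlo + k = p.length + 1 → 1 ≤ jlo →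
      (PySem.List.pyRange (jlo : Int) ((p.length : Int) + 1)).foldl (stepB towels cache p)
        (dpAt towels cache p (jlo - 1)) = dpAt towels cache p p.length := by
  intro k
  induction k with
  | zero =>
    intro jlo he h1
    rw [PySem.List.pyRange_one_eq_nil (by omega)]
    rw [List.foldl_nil, show jlo - 1 = p.length by omega]
  | succ k ihk =>
    intro jlo he h1
    rw [PySem.List.pyRange_one_cons (by exact_mod_cast (by omega : jlo < p.length + 1)), List.foldl_cons,
        stepB_eq towels cache hnt p jlo h1 (by omega),
        show ((jlo : Int) + 1) = (((jlo + 1 : Nat)) : Int) by push_cast; ring]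
    have := ihk (jlo + 1) (by omega) (by omega)
    rwa [show (jlo + 1) - 1 = jlo from rfl] at this

theorem cwF_nil (towels : List String) (cache : PySem.Dict (List Char) Int) :
    cwF towels cache 1 [] = (match PySem.Dict.get? cache ([] : List Char) with
      | some v => v | none => 1) := by
  rw [cwF]; cases PySem.Dict.get? cache ([] : List Char) <;> simp

theorem alt_unfold (pattern : String) (towels : List String)
    (result : Option (List (String × Int))) :
    count_ways_to_form_pattern_alt pattern towels result =
      ((PySem.List.pyRange 1 ((pattern.toList.length : Int) + 1)).foldl
        (stepB towels (pvCacheOf result) pattern.toList)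
        [match PySem.Dict.get? (pvCacheOf result) ([] : List Char) with
         | some v => v | none => 1]).getD 0 0 := rfl

theorem dp0_eq (towels : List String) (cache : PySem.Dict (List Char) Int) (p : List Char) :
    [(match PySem.Dict.get? cache ([] : List Char) with
      | some v => v | none => 1 : Int)] = dpAt towels cache p 0 := by
  unfold dpAt
  simp only [Nat.zero_add, List.range_one, List.map_cons, List.map_nil, Nat.sub_zero,
    Nat.add_zero, List.drop_length, List.length_nil]
  rw [← cwF_nil towels cache]

theorem alt_correct (pattern : String) (towels : List String)
    (result : Option (List (String × Int))) (hnt : "" ∉ towels) :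
    count_ways_to_form_pattern_alt pattern towels result =
      cwF towels (pvCacheOf result) (pattern.toList.length + 1) pattern.toList := by
  have hl := loopB towels (pvCacheOf result) hnt pattern.toList pattern.toList.length 1
    (by omega) (by omega)
  rw [show (((1 : Nat)) : Int) = (1 : Int) from by norm_num,
      show (1 : Nat) - 1 = 0 from rfl] at hl
  rw [alt_unfold, dp0_eq towels (pvCacheOf result) pattern.toList, hl]
  unfold dpAt
  rw [PySem.List.getD_map_range _ _ _ _ (by omega)]
  simp

-- A's value when the pattern itself is a key of the incoming cache
theorem a_cache_hit (pattern : String) (towels : List String)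
    (result : Option (List (String × Int))) (v : Int)
    (hv : PySem.Dict.get? (pvCacheOf result) pattern.toList = some v) :
    count_ways_to_form_pattern pattern towels result = v := by
  unfold count_ways_to_form_pattern
  simp only [cwGo, hv]

-- B's value when the pattern itself is a key of the incoming cache (nonempty pattern:
-- the last loop iteration looks the full pattern up)
theorem b_cache_hit (pattern : String) (towels : List String)
    (result : Option (List (String × Int))) (v : Int) (hne : pattern.toList ≠ [])
    (hv : PySem.Dict.get? (pvCacheOf result) pattern.toList = some v) :
    count_ways_to_form_pattern_alt pattern towels result = v := by
  rw [alt_unfold]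
  have hn1 : 1 ≤ pattern.toList.length := List.length_pos_of_ne_nil hne
  rw [PySem.List.pyRange_one_succ_right (by exact_mod_cast hn1), List.foldl_append,
      List.foldl_cons, List.foldl_nil]
  unfold stepB
  simp only [Int.toNat_natCast, Nat.sub_self, List.drop_zero, hv, List.getD_cons_zero]

-- the incoming cache satisfies the dict invariant
theorem cache_inv (towels : List String) (cache : PySem.Dict (List Char) Int) :
    cwInv towels cache cache := by
  constructor
  · intro k v hkv
    rw [cwF, hkv]
  · intro k v hkv
    exact hkv

-- a cache entry for the pattern exists when Pre_'s third disjunct holds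
theorem cache_lookup_of_exists (pattern : String) (result : Option (List (String × Int)))
    (h : ∃ q ∈ result.getD [], q.1 = pattern) :
    ∃ v, PySem.Dict.get? (pvCacheOf result) pattern.toList = some v := by
  obtain ⟨q, hq, hq1⟩ := h
  unfold pvCacheOf PySem.Dict.get?
  have : ∃ x ∈ (PySem.Dict.mk ((result.getD []).map (fun q => (q.1.toList, q.2)))).items,
      (fun p => p.1 == pattern.toList) x = true := by
    refine ⟨(q.1.toList, q.2), ?_, by simp [hq1]⟩
    simp only [List.mem_map]
    exact ⟨q, hq, rfl⟩
  have hfs := List.find?_isSome.mpr this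
  obtain ⟨x, hx⟩ := Option.isSome_iff_exists.mp hfs
  exact ⟨x.2, by simp [hx]⟩

-- ===== VERDICT (by name: the statement is the Claim_ definition above) =====
theorem count_ways_to_form_pattern_spec : Claim_equal_count_ways_to_form_pattern := by
  intro pattern towels result _ hpre
  unfold Spec_count_ways_to_form_pattern
  by_cases hnt : "" ∈ towels
  · rcases hpre with hp | hnt' | hex
    · -- empty pattern: both sides are cache.get "" or 1
      subst hp
      rw [alt_unfold]
      unfold count_ways_to_form_pattern
      have : ("" : String).toList = [] := by simp
      rw [this]
      simp only [List.length_nil, Nat.cast_zero, zero_add,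
        PySem.List.pyRange_one_eq_nil (by norm_num : (1 : Int) ≤ 1), List.foldl_nil]
      simp only [cwGo]
      cases PySem.Dict.get? (pvCacheOf result) ([] : List Char) <;> simp
    · exact absurd hnt hnt'
    · -- the pattern is a key of the incoming cache
      by_cases hne : pattern.toList = []
      · -- still the empty pattern (covered as above)
        obtain ⟨v, hv⟩ := cache_lookup_of_exists pattern result hex
        rw [a_cache_hit pattern towels result v hv, alt_unfold, hne]
        simp only [List.length_nil, Nat.cast_zero, zero_add,
          PySem.List.pyRange_one_eq_nil (by norm_num : (1 : Int) ≤ 1), List.foldl_nil]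
        rw [hne] at hv
        simp [hv]
      · obtain ⟨v, hv⟩ := cache_lookup_of_exists pattern result hex
        rw [a_cache_hit pattern towels result v hv,
            b_cache_hit pattern towels result v hne hv]
  · -- no empty towel: both ports equal the pure recursion cwF
    have hA := cwGo_correct towels (pvCacheOf result) hnt (pattern.toList.length + 1)
      pattern.toList (pvCacheOf result) (by omega) (cache_inv towels (pvCacheOf result))
    unfold count_ways_to_form_pattern
    rw [hA.1, alt_correct pattern towels result hnt]
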